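-- pv_equiv track=rewrite | github.com/rphlo/py-retricon | retricon.py | fillPixelsHSym
-- ===== SOURCE A (Python) =====
-- import hashlib, math
--
-- def fillPixelsHSym(id, dimension):
--     mid = int(math.ceil(dimension / 2.0))
--     odd = dimension % 2 != 0
--
--     pic = [0]*dimension
--     for row in range(dimension):
--         pic[row] = [0]*dimension
--         for col in range(dimension):
--             p = (row * dimension) + col
--             if row >= mid:
--                 p = (dimension - 1 - row) * dimension + col
--             pic[row][col] = id['pixels'][p]
--
--     return pic
-- ===== SOURCE B (Python) =====
-- def fillPixelsHSym(id, dimension):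
--     if dimension <= 0:
--         return []
--     top = [id['pixels'][r * dimension:(r + 1) * dimension]
--            for r in range((dimension + 1) // 2)]
--     return top + [row[:] for row in reversed(top[:dimension // 2])]
-- ===== Notes on version B (the rewrite author's own statement) =====
-- stated objective: simpler
-- what changed: Replaces A's per-cell indexed double loop with its branch on row>=mid by slicing the flat pixel array into row chunks (no per-cell index arithmetic) and producing the bottom half as the reversed prefix of the chunk list.
import Mathlib
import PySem

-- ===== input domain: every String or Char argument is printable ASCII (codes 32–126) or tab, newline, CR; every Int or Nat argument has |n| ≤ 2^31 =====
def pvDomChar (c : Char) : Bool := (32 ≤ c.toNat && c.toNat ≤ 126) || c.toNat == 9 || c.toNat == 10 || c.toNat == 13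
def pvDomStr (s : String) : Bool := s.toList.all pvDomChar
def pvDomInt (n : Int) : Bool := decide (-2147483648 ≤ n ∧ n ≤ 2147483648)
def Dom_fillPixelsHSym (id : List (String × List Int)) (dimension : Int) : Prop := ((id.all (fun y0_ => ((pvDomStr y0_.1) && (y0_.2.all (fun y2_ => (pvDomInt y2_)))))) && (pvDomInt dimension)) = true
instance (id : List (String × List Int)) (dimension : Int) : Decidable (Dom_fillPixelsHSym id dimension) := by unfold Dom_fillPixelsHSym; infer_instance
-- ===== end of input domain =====

-- B replaces A's per-cell indexed double loop (with its branch on row >= mid) by slicing the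
-- flat pixel list into row chunks and mirroring the bottom half as the reversed prefix of the
-- chunk list; same cost, shorter and without per-cell index arithmetic.

-- ===== PORT A =====
-- mid = int(math.ceil(dimension / 2.0)): exact for |dimension| ≤ 2^31, ported as -((-d) // 2);
-- the unused variable 'odd' is dropped; id['pixels'][p] is a raising lookup: the KeyError /
-- IndexError inputs are excluded by Pre_, so pyGetD with default is exact there.
def fillPixelsHSym (id : List (String × List Int)) (dimension : Int) : List (List Int) :=
  let mid : Int := -(PySem.Int.floordiv (-dimension) 2)
  let px : List Int := ((PySem.Dict.mk id).get? "pixels").getD []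
  (PySem.List.pyRange 0 dimension 1).map (fun row =>
    (PySem.List.pyRange 0 dimension 1).map (fun col =>
      let p : Int := row * dimension + col
      let p : Int := if mid ≤ row then (dimension - 1 - row) * dimension + col else p
      PySem.List.pyGetD px p 0))

-- ===== PORT B =====
-- row[:] is PySem.List.slice row none none (the copy; equal to row for pure lists).
def fillPixelsHSym_alt (id : List (String × List Int)) (dimension : Int) : List (List Int) :=
  if dimension ≤ 0 then []
  else
    let px : List Int := ((PySem.Dict.mk id).get? "pixels").getD []
    let top : List (List Int) :=
      (PySem.List.pyRange 0 (PySem.Int.floordiv (dimension + 1) 2) 1).map (fun r =>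
        PySem.List.slice px (some (r * dimension)) (some ((r + 1) * dimension)))
    top ++ (PySem.List.slice top (some 0) (some (PySem.Int.floordiv dimension 2))).reverse.map
      (fun row => PySem.List.slice row none none)

-- ===== PRECONDITION & SPEC =====
-- Pre_ excludes exactly the inputs where the Python A raises: dimension > 0 with the key
-- 'pixels' missing (KeyError) or its list shorter than ceil(d/2)*d (IndexError).
def Pre_fillPixelsHSym (id : List (String × List Int)) (dimension : Int) : Prop :=
  dimension ≤ 0 ∨
    (((PySem.Dict.mk id).get? "pixels").isSome = true ∧
      PySem.Int.floordiv (dimension + 1) 2 * dimension ≤ ((((PySem.Dict.mk id).get? "pixels").getD []).length : Int))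
instance (id : List (String × List Int)) (dimension : Int) : Decidable (Pre_fillPixelsHSym id dimension) := by unfold Pre_fillPixelsHSym; infer_instance

def pvWitness_fillPixelsHSym : (List (String × List Int)) × Int := ([("pixels", [1, 2, 3, 4])], 2)

def Spec_fillPixelsHSym (id : List (String × List Int)) (dimension : Int) (out : List (List Int)) : Prop := out = fillPixelsHSym_alt id dimension
instance (id : List (String × List Int)) (dimension : Int) (out : List (List Int)) : Decidable (Spec_fillPixelsHSym id dimension out) := by unfold Spec_fillPixelsHSym; infer_instance

-- ===== CLAIM (what is proved, stated in full; the proofs are below) =====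
def Claim_equal_fillPixelsHSym : Prop := ∀ (id : List (String × List Int)) (dimension : Int), Dom_fillPixelsHSym id dimension → Pre_fillPixelsHSym id dimension → Spec_fillPixelsHSym id dimension (fillPixelsHSym id dimension)

-- ===== LEMMAS AND PROOFS =====

-- A's ceiling mid equals B's (d+1)//2 form.
lemma mid_eq (d : Int) : -(PySem.Int.floordiv (-d) 2) = PySem.Int.floordiv (d + 1) 2 := by
  rw [PySem.Int.floordiv_eq_ediv_of_pos (by omega), PySem.Int.floordiv_eq_ediv_of_pos (by omega)]
  omega

-- a slice of length d equals the per-cell read row, inside bounds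
lemma chunk_eq_row (px : List Int) (a d : Int) (ha : 0 ≤ a) (hd : 0 < d)
    (hlen : a + d ≤ (px.length : Int)) :
    PySem.List.slice px (some a) (some (a + d)) =
      (PySem.List.pyRange 0 d 1).map (fun c => PySem.List.pyGetD px (a + c) 0) := by
  rw [PySem.List.slice_toNat px ha (by omega : (0:ℤ) ≤ a + d)]
  apply List.ext_getElem
  · simp [PySem.List.length_pyRange_one]
    omega
  · intro k h1 h2
    have hk : k < d.toNat := by
      simp [PySem.List.length_pyRange_one] at h2; omega
    simp only [List.getElem_take, List.getElem_drop, List.getElem_map,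
      PySem.List.getElem_pyRange_one]
    rw [PySem.List.pyGetD_eq_getElem px (i := a + (0 + (k:ℤ))) 0 (by omega) (by omega)]
    congr 1
    omega

-- ===== VERDICT (by name: the statement is the Claim_ definition above) =====
theorem fillPixelsHSym_spec : Claim_equal_fillPixelsHSym := by
  intro id d _ hpre
  unfold Spec_fillPixelsHSym fillPixelsHSym fillPixelsHSym_alt
  by_cases hd : d ≤ 0
  · simp [hd, PySem.List.pyRange_one_eq_nil hd]
  · rw [if_neg hd]
    simp only [mid_eq]
    set px : List Int := ((PySem.Dict.mk id).get? "pixels").getD [] with hpx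
    have hlen : PySem.Int.floordiv (d + 1) 2 * d ≤ (px.length : Int) := by
      rcases hpre with h | ⟨_, h⟩
      · omega
      · exact h
    have hmid1 : 1 ≤ PySem.Int.floordiv (d + 1) 2 := by
      rw [PySem.Int.floordiv_eq_ediv_of_pos (by omega)]; omega
    have hmid2 : PySem.Int.floordiv (d + 1) 2 ≤ d := by
      rw [PySem.Int.floordiv_eq_ediv_of_pos (by omega)]; omega
    have hhalf : PySem.Int.floordiv d 2 = d - PySem.Int.floordiv (d + 1) 2 := by
      rw [PySem.Int.floordiv_eq_ediv_of_pos (by omega),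
        PySem.Int.floordiv_eq_ediv_of_pos (by omega)]
      omega
    set mid := PySem.Int.floordiv (d + 1) 2 with hm
    have h2m : d ≤ 2 * mid ∧ 2 * mid ≤ d + 1 := by
      rw [hm, PySem.Int.floordiv_eq_ediv_of_pos (by omega)]; omega
    obtain ⟨h2m1, h2m2⟩ := h2m
    have hchunk : ∀ r : Int, 0 ≤ r → r < mid →
        PySem.List.slice px (some (r * d)) (some ((r + 1) * d)) =
          (PySem.List.pyRange 0 d 1).map (fun c => PySem.List.pyGetD px (r * d + c) 0) := by
      intro r hr0 hrm
      have hrd : (r + 1) * d ≤ mid * d := by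
        apply mul_le_mul_of_nonneg_right _ (by omega : (0:ℤ) ≤ d)
        omega
      have hrl : r * d + d ≤ (px.length : Int) := by nlinarith [hrd, hlen]
      have := chunk_eq_row px (r * d) d (mul_nonneg hr0 (by omega)) (by omega) hrl
      rw [show r * d + d = (r + 1) * d by ring] at this
      exact this
    -- rewrite B's bottom-half slicing into take/reverse form
    rw [hhalf]
    simp only [PySem.List.slice_none_none, PySem.List.slice_zero_start,
      PySem.List.slice_to _ (by omega : (0:Int) ≤ d - mid), List.map_id']
    have htop : ((PySem.List.pyRange 0 mid 1).map (fun r =>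
        PySem.List.slice px (some (r * d)) (some ((r + 1) * d)))).length = mid.toNat := by
      simp [PySem.List.length_pyRange_one]
    have htake : (((PySem.List.pyRange 0 mid 1).map (fun r =>
        PySem.List.slice px (some (r * d)) (some ((r + 1) * d)))).take (d - mid).toNat).length
        = (d - mid).toNat := by
      simp [htop]; omega
    apply List.ext_getElem
    · simp [PySem.List.length_pyRange_one, htop]
      omega
    · intro k h1 h2
      have hkd : k < d.toNat := by
        simpa [PySem.List.length_pyRange_one] using h1
      rw [List.getElem_map, PySem.List.getElem_pyRange_one]
      by_cases hkm : k < mid.toNat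
      · rw [List.getElem_append_left (by omega : k < ((PySem.List.pyRange 0 mid 1).map (fun r =>
            PySem.List.slice px (some (r * d)) (some ((r + 1) * d)))).length)]
        rw [List.getElem_map, PySem.List.getElem_pyRange_one]
        rw [hchunk (0 + (k : Int)) (by omega) (by omega)]
        apply List.map_congr_left
        intro c _
        rw [if_neg (by omega : ¬ mid ≤ 0 + (k : Int))]
      · rw [List.getElem_append_right (by omega : ((PySem.List.pyRange 0 mid 1).map (fun r =>
            PySem.List.slice px (some (r * d)) (some ((r + 1) * d)))).length ≤ k)]
        rw [List.getElem_reverse, List.getElem_take, List.getElem_map,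
          PySem.List.getElem_pyRange_one]
        have harg : (0 : Int) + ((((PySem.List.pyRange 0 mid 1).map (fun r =>
            PySem.List.slice px (some (r * d)) (some ((r + 1) * d)))).take (d - mid).toNat).length
              - 1 - (k - ((PySem.List.pyRange 0 mid 1).map (fun r =>
            PySem.List.slice px (some (r * d)) (some ((r + 1) * d)))).length) : ℕ)
            = d - 1 - (k : Int) := by
          rw [htake, htop]; omega
        rw [harg, hchunk (d - 1 - (k : Int)) (by omega) (by omega)]
        apply List.map_congr_left
        intro c _
        rw [if_pos (by omega : mid ≤ 0 + (k : Int))]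
        ring_nf
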